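-- pv_equiv track=rewrite | github.com/daiseek/programmers-codingtests-introduction | python/12.py | solution
-- ===== SOURCE A (Python) =====
-- def solution(s1, s2):
--     answer = 0
--     lessList = []
--     largerList = []
--
--     if len(s1) > len(s2):
--         lessList = s2
--         largerList = s1
--     else:
--         lessList = s1
--         largerList = s2
--
--
--     for i in range(len(lessList)):
--         for j in range(len(largerList)):
--             if lessList[i] == largerList[j]:
--                 answer += 1
--
--
--     return answer
-- ===== SOURCE B (Python) =====
-- def solution(s1, s2):
--     counts = {}
--     for x in s2:
--         counts[x] = counts.get(x, 0) + 1
--     return sum(counts.get(x, 0) for x in s1)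
-- ===== Notes on version B (the rewrite author's own statement) =====
-- stated objective: faster
-- what changed: Replaces the nested index-by-index scan (after a larger/smaller split) with one pass building a frequency dict of s2 and one pass summing the counts of s1's elements.
import Mathlib
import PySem

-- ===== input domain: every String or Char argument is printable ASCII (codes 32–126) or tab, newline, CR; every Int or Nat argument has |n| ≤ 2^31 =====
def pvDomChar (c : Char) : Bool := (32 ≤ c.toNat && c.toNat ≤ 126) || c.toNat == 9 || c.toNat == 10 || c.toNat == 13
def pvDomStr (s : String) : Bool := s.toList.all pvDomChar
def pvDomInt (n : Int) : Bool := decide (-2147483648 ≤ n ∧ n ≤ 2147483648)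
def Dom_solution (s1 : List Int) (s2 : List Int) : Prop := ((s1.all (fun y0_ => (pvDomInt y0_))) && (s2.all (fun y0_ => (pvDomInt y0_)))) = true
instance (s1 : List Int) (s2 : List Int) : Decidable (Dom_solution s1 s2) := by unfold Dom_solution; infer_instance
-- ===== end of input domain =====

-- B replaces A's nested index-by-index scan with a frequency dict of s2 and a single summing pass over s1 (asymptotically faster).


-- ===== PORT A =====
def solution (s1 : List Int) (s2 : List Int) : Int :=
  let p := if PySem.List.len s1 > PySem.List.len s2 then (s2, s1) else (s1, s2)
  let lessList := p.1
  let largerList := p.2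
  (PySem.List.pyRange 0 (PySem.List.len lessList)).foldl
    (fun answer i =>
      (PySem.List.pyRange 0 (PySem.List.len largerList)).foldl
        (fun a j =>
          if PySem.List.pyGetD lessList i 0 == PySem.List.pyGetD largerList j 0 then a + 1 else a)
        answer)
    0

-- ===== PORT B =====
def solution_alt (s1 : List Int) (s2 : List Int) : Int :=
  let counts : PySem.Dict Int Int :=
    s2.foldl (fun d x => d.modify x 0 (fun c => c + 1)) PySem.Dict.empty
  (s1.map (fun x => counts.getD x 0)).sum

-- ===== PRECONDITION & SPEC =====
def Spec_solution (s1 : List Int) (s2 : List Int) (out : Int) : Prop := out = solution_alt s1 s2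
instance (s1 : List Int) (s2 : List Int) (out : Int) : Decidable (Spec_solution s1 s2 out) := by unfold Spec_solution; infer_instance

-- ===== CLAIM (what is proved, stated in full; the proofs are below) =====
def Claim_equal_solution : Prop := ∀ (s1 : List Int) (s2 : List Int), Dom_solution s1 s2 → Spec_solution s1 s2 (solution s1 s2)

-- ===== LEMMAS AND PROOFS =====

lemma sum_map_add_pointwise (ys : List Int) (f g : Int → Int) :
    (ys.map (fun y => f y + g y)).sum = (ys.map f).sum + (ys.map g).sum := by
  induction ys with
  | nil => simp
  | cons b ys ih => simp [ih]; ring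

lemma sum_indicator_eq_count (ys : List Int) (a : Int) :
    (ys.map (fun y => if y = a then (1 : Int) else 0)).sum = (ys.count a : Int) := by
  induction ys with
  | nil => simp
  | cons b ys ih =>
      rcases eq_or_ne b a with h | h <;> simp [h, ih] <;> omega

-- A's nested loop over (xs, ys) counts, for each element of xs, its occurrences in ys.
lemma pairs_eq_sum_counts (xs ys : List Int) :
    (PySem.List.pyRange 0 (PySem.List.len xs)).foldl
      (fun answer i =>
        (PySem.List.pyRange 0 (PySem.List.len ys)).foldl
          (fun a j => if PySem.List.pyGetD xs i 0 == PySem.List.pyGetD ys j 0 then a + 1 else a)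
          answer)
      0
    = (xs.map (fun x => (ys.count x : Int))).sum := by
  rw [PySem.List.foldl_pyRange_pyGetD xs 0
      (fun answer x =>
        (PySem.List.pyRange 0 (PySem.List.len ys)).foldl
          (fun a j => if x == PySem.List.pyGetD ys j 0 then a + 1 else a) answer)
      0 le_rfl]
  simp only [Int.toNat_zero, List.drop_zero]
  have hinner : ∀ (answer x : Int),
      (PySem.List.pyRange 0 (PySem.List.len ys)).foldl
        (fun a j => if x == PySem.List.pyGetD ys j 0 then a + 1 else a) answer
      = answer + (ys.count x : Int) := by
    intro answer x
    rw [PySem.List.foldl_pyRange_pyGetD ys 0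
        (fun a y => if x == y then a + 1 else a) answer le_rfl]
    simp only [Int.toNat_zero, List.drop_zero]
    have hbeq : (fun (a : Int) (y : Int) => if x == y then a + 1 else a)
         = (fun (a : Int) (y : Int) => if y == x then a + 1 else a) := by
      funext a y; simp [BEq.comm]
    rw [hbeq, PySem.List.foldl_beq_add_one]
  suffices h : ∀ acc : Int,
      xs.foldl
        (fun answer x =>
          (PySem.List.pyRange 0 (PySem.List.len ys)).foldl
            (fun a j => if x == PySem.List.pyGetD ys j 0 then a + 1 else a) answer) acc
      = acc + (xs.map (fun x => (ys.count x : Int))).sum by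
    simpa using h 0
  intro acc
  induction xs generalizing acc with
  | nil => simp
  | cons a xs ih =>
      simp only [List.foldl_cons, List.map_cons, List.sum_cons]
      rw [ih, hinner]
      ring

-- B computes the same sum: the dict built from s2 maps each value to its count in s2.
lemma alt_eq_sum_counts (s1 s2 : List Int) :
    solution_alt s1 s2 = (s1.map (fun x => (s2.count x : Int))).sum := by
  have hc : ∀ x : Int,
      (s2.foldl (fun d x => d.modify x 0 (fun c => c + 1)) PySem.Dict.empty).getD x 0
      = (s2.count x : Int) := by
    intro x
    rw [PySem.Dict.getD_foldl_modify_add_one]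
    simp [PySem.Dict.empty, PySem.Dict.getD, PySem.Dict.get?]
  simp only [solution_alt]
  exact congrArg List.sum (List.map_congr_left fun x _ => hc x)

-- the double count is symmetric in the two lists
lemma sum_counts_comm (xs ys : List Int) :
    (xs.map (fun x => (ys.count x : Int))).sum = (ys.map (fun y => (xs.count y : Int))).sum := by
  induction xs with
  | nil => simp
  | cons a xs ih =>
      simp only [List.map_cons, List.sum_cons, ih]
      have hstep : (ys.map (fun y => ((a :: xs).count y : Int))).sum
           = (ys.map (fun y => (if y = a then (1 : Int) else 0) + (xs.count y : Int))).sum := by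
        apply congrArg
        apply List.map_congr_left
        intro y _
        rcases eq_or_ne y a with h | h <;> simp [List.count_cons, h] <;> omega
      rw [hstep, sum_map_add_pointwise, sum_indicator_eq_count]

-- ===== VERDICT (by name: the statement is the Claim_ definition above) =====
theorem solution_spec : Claim_equal_solution := by
  intro s1 s2 _
  unfold Spec_solution solution
  rw [alt_eq_sum_counts]
  by_cases h : PySem.List.len s1 > PySem.List.len s2
  · simp only [h, if_pos]
    rw [pairs_eq_sum_counts s2 s1, sum_counts_comm]
  · simp only [h, if_false]
    rw [pairs_eq_sum_counts s1 s2]
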